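-- pv_equiv track=rewrite | github.com/daidaiershidi/temp | mytools/PlotPred.py | GetSegmentClips
-- ===== SOURCE A (Python) =====
-- def GetSegmentClips(mat_1d, scale=1):
--     """
--     mat_1d(T)
--     """
--     label = [mat_1d[0]]
--     start =[0]
--     last_label = mat_1d[0]
--     for i, _label in enumerate(mat_1d):
--         if mat_1d[i] != last_label:
--             label.append(mat_1d[i])
--             start.append(i)
--             last_label = mat_1d[i]
--     idx = 0
--     new_start = [0]
--     for i in range(len(start[:-1])):
--         idx += ((start[i+1] - start[i]) * scale)
--         new_start.append(idx)
--     end = new_start[1:] + [(len(mat_1d) - start[-1]) * scale + idx]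
--     return label, new_start, end
-- ===== SOURCE B (Python) =====
-- def GetSegmentClips(mat_1d, scale=1):
--     label = [mat_1d[0]]
--     bounds = [0]
--     for i in range(1, len(mat_1d)):
--         if mat_1d[i] != mat_1d[i - 1]:
--             label.append(mat_1d[i])
--             bounds.append(i)
--     bounds.append(len(mat_1d))
--     new_start = [b * scale for b in bounds[:-1]]
--     end = [b * scale for b in bounds[1:]]
--     return label, new_start, end
-- ===== Notes on version B (the rewrite author's own statement) =====
-- stated objective: simpler
-- what changed: B builds one unified boundary-index list (run starts plus the final length) in a single comparison-with-previous pass and derives both scaled position lists uniformly by mapping *scale over bounds[:-1] and bounds[1:], replacing A's last_label state machine, its difference-accumulator second loop and its asymmetric closed-form last end.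
import Mathlib
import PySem

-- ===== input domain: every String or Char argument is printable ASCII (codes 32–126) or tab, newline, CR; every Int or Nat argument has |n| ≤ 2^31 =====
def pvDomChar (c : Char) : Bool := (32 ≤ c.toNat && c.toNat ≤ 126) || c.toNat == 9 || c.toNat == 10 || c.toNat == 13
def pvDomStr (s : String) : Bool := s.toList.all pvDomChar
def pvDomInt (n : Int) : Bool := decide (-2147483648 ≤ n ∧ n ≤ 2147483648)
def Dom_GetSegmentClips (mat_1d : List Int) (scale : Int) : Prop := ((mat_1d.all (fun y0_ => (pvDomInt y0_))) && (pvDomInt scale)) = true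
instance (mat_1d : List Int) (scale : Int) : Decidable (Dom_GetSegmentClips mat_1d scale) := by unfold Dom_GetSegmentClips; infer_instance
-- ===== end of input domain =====

-- B replaces A's last_label state machine, difference-accumulator loop and asymmetric
-- last-end formula by one boundary-index list scaled uniformly (objective: simpler).

-- ===== PORT A =====
-- step of A's first loop: state (label, start, last_label); the body reads mat_1d[i]
def pvStepA (mat_1d : List Int) (st : List Int × List Int × Int) (p : Int × Int) :
    List Int × List Int × Int :=
  if PySem.List.pyGetD mat_1d p.1 0 ≠ st.2.2 then
    (st.1 ++ [PySem.List.pyGetD mat_1d p.1 0], st.2.1 ++ [p.1], PySem.List.pyGetD mat_1d p.1 0)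
  else st

-- step of A's second loop: state (idx, new_start)
def pvStepA2 (start : List Int) (scale : Int) (st : Int × List Int) (i : Int) : Int × List Int :=
  let idx := st.1 + (PySem.List.pyGetD start (i + 1) 0 - PySem.List.pyGetD start i 0) * scale
  (idx, st.2 ++ [idx])

def GetSegmentClips (mat_1d : List Int) (scale : Int) : List Int × List Int × List Int :=
  -- first-element read: IndexError on the empty list, excluded by Pre_ (the default 0 is never used there)
  let h := (PySem.List.pyGet? mat_1d 0).getD 0
  let st := (PySem.List.enumerate mat_1d 0).foldl (pvStepA mat_1d) ([h], [0], h)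
  let label := st.1
  let start := st.2.1
  let st2 := (PySem.List.pyRange 0 ((PySem.List.slice start none (some (-1))).length) 1).foldl
      (pvStepA2 start scale) (0, [0])
  let idx := st2.1
  let new_start := st2.2
  let endl := new_start.drop 1 ++
      [((mat_1d.length : Int) - (PySem.List.pyGet? start (-1)).getD 0) * scale + idx]
  (label, new_start, endl)

-- ===== PORT B =====
-- step of B's single boundary pass: state (label, bounds)
def pvStepB (mat_1d : List Int) (st : List Int × List Int) (i : Int) : List Int × List Int :=
  if PySem.List.pyGetD mat_1d i 0 ≠ PySem.List.pyGetD mat_1d (i - 1) 0 then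
    (st.1 ++ [PySem.List.pyGetD mat_1d i 0], st.2 ++ [i])
  else st

def GetSegmentClips_alt (mat_1d : List Int) (scale : Int) : List Int × List Int × List Int :=
  let h := (PySem.List.pyGet? mat_1d 0).getD 0
  let st := (PySem.List.pyRange 1 mat_1d.length 1).foldl (pvStepB mat_1d) ([h], [0])
  let bounds := st.2 ++ [(mat_1d.length : Int)]
  let new_start := bounds.dropLast.map (· * scale)
  let endl := (bounds.drop 1).map (· * scale)
  (st.1, new_start, endl)

-- ===== PRECONDITION & SPEC =====
-- A raises IndexError reading the first element when mat_1d is empty; Pre_ excludes exactly the empty list (B raises there too).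
def Pre_GetSegmentClips (mat_1d : List Int) (scale : Int) : Prop := mat_1d ≠ []
instance (mat_1d : List Int) (scale : Int) : Decidable (Pre_GetSegmentClips mat_1d scale) := by
  unfold Pre_GetSegmentClips; infer_instance
def pvWitness_GetSegmentClips : List Int × Int := ([1, 1, 2], 3)
def Spec_GetSegmentClips (mat_1d : List Int) (scale : Int) (out : List Int × List Int × List Int) : Prop := out = GetSegmentClips_alt mat_1d scale
instance (mat_1d : List Int) (scale : Int) (out : List Int × List Int × List Int) : Decidable (Spec_GetSegmentClips mat_1d scale out) := by unfold Spec_GetSegmentClips; infer_instance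

-- ===== CLAIM (what is proved, stated in full; the proofs are below) =====
def Claim_equal_GetSegmentClips : Prop := ∀ (mat_1d : List Int) (scale : Int), Dom_GetSegmentClips mat_1d scale → Pre_GetSegmentClips mat_1d scale → Spec_GetSegmentClips mat_1d scale (GetSegmentClips mat_1d scale)

-- ===== LEMMAS AND PROOFS =====

-- reference recursion: scan l from index a comparing with prev, collecting labels and starts
def pvRunAux (l : List Int) (label start : List Int) (prev : Int) (a : Nat) :
    List Int × List Int × Int :=
  if h : a < l.length then
    if l.getD a 0 ≠ prev then
      pvRunAux l (label ++ [l.getD a 0]) (start ++ [(a : Int)]) (l.getD a 0) (a + 1)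
    else pvRunAux l label start prev (a + 1)
  else (label, start, prev)
termination_by l.length - a

lemma pvRunAux_start_prefix (l : List Int) : ∀ (k a : Nat), l.length - a = k →
    ∀ (label start : List Int) (prev : Int),
    ∃ ext, (pvRunAux l label start prev a).2.1 = start ++ ext := by
  intro k
  induction k with
  | zero =>
    intro a hk label start prev
    rw [pvRunAux]
    simp [show ¬ a < l.length by omega]
  | succ k ih =>
    intro a hk label start prev
    have ha : a < l.length := by omega
    rw [pvRunAux, dif_pos ha]
    by_cases hx : l.getD a 0 ≠ prev
    · rw [if_pos hx]
      obtain ⟨ext, he⟩ := ih (a + 1) (by omega) (label ++ [l.getD a 0])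
        (start ++ [(a : Int)]) (l.getD a 0)
      exact ⟨(a : Int) :: ext, by rw [he]; simp⟩
    · rw [if_neg hx]
      exact ih (a + 1) (by omega) label start prev

lemma pvFoldA (l : List Int) : ∀ (k a : Nat), l.length - a = k →
    ∀ (label start : List Int) (prev : Int),
    (PySem.List.pyRange (a : Int) (l.length : Int) 1).foldl
      (fun st j => pvStepA l st (j, PySem.List.pyGetD l j 0)) (label, start, prev)
    = pvRunAux l label start prev a := by
  intro k
  induction k with
  | zero =>
    intro a hk label start prev
    rw [PySem.List.pyRange_one_eq_nil (by exact_mod_cast (by omega : l.length ≤ a))]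
    rw [pvRunAux]
    simp [show ¬ a < l.length by omega]
  | succ k ih =>
    intro a hk label start prev
    have ha : a < l.length := by omega
    rw [PySem.List.pyRange_one_cons (by exact_mod_cast ha), List.foldl_cons]
    have hc : ((a : Int) + 1) = ((a + 1 : Nat) : Int) := by push_cast; ring
    rw [pvRunAux, dif_pos ha]
    by_cases hx : l.getD a 0 ≠ prev
    · have hstep : pvStepA l (label, start, prev) ((a : Int), PySem.List.pyGetD l (a : Int) 0)
          = (label ++ [l.getD a 0], start ++ [(a : Int)], l.getD a 0) := by
        simp only [pvStepA, PySem.List.pyGetD_natCast]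
        rw [if_pos hx]
      rw [hstep, hc, ih (a + 1) (by omega), if_pos hx]
    · have hstep : pvStepA l (label, start, prev) ((a : Int), PySem.List.pyGetD l (a : Int) 0)
          = (label, start, prev) := by
        simp only [pvStepA, PySem.List.pyGetD_natCast]
        rw [if_neg hx]
      rw [hstep, hc, ih (a + 1) (by omega), if_neg hx]

lemma pvFoldB (l : List Int) : ∀ (k a : Nat), l.length - a = k → 1 ≤ a →
    ∀ (label bnds : List Int),
    (PySem.List.pyRange (a : Int) (l.length : Int) 1).foldl (pvStepB l) (label, bnds)
    = ((pvRunAux l label bnds (l.getD (a - 1) 0) a).1,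
       (pvRunAux l label bnds (l.getD (a - 1) 0) a).2.1) := by
  intro k
  induction k with
  | zero =>
    intro a hk ha1 label bnds
    rw [PySem.List.pyRange_one_eq_nil (by exact_mod_cast (by omega : l.length ≤ a))]
    rw [pvRunAux]
    simp [show ¬ a < l.length by omega]
  | succ k ih =>
    intro a hk ha1 label bnds
    have ha : a < l.length := by omega
    rw [PySem.List.pyRange_one_cons (by exact_mod_cast ha), List.foldl_cons]
    have hc : ((a : Int) + 1) = ((a + 1 : Nat) : Int) := by push_cast; ring
    have hm1 : ((a : Int) - 1) = ((a - 1 : Nat) : Int) := by omega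
    rw [pvRunAux, dif_pos ha]
    by_cases hx : l.getD a 0 ≠ l.getD (a - 1) 0
    · have hstep : pvStepB l (label, bnds) (a : Int)
          = (label ++ [l.getD a 0], bnds ++ [(a : Int)]) := by
        simp only [pvStepB, hm1, PySem.List.pyGetD_natCast]
        rw [if_pos hx]
      rw [hstep, hc, ih (a + 1) (by omega) (by omega), if_pos hx]
      simp only [Nat.add_sub_cancel]
    · have hx' : l.getD a 0 = l.getD (a - 1) 0 := by simpa using hx
      have hstep : pvStepB l (label, bnds) (a : Int) = (label, bnds) := by
        simp only [pvStepB, hm1, PySem.List.pyGetD_natCast]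
        rw [if_neg hx]
      rw [hstep, hc, ih (a + 1) (by omega) (by omega), if_neg hx]
      simp only [Nat.add_sub_cancel, hx']

lemma pvTele (s : List Int) (scale : Int) (h0 : s.getD 0 0 = 0) :
    ∀ (k : Nat), k < s.length →
    (PySem.List.pyRange 0 (k : Int) 1).foldl (pvStepA2 s scale) (0, [0])
    = (s.getD k 0 * scale, (s.take (k + 1)).map (· * scale)) := by
  intro k
  induction k with
  | zero =>
    intro hk
    rw [PySem.List.pyRange_one_eq_nil (by simp)]
    obtain ⟨x, t, rfl⟩ : ∃ x t, s = x :: t := by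
      cases s with
      | nil => simp at hk
      | cons x t => exact ⟨x, t, rfl⟩
    simp at h0
    simp [h0]
  | succ k ih =>
    intro hk
    have hk' : k < s.length := by omega
    have hc : ((k + 1 : Nat) : Int) = (k : Int) + 1 := by push_cast; ring
    rw [hc, PySem.List.pyRange_one_succ_right (by positivity), List.foldl_append,
        ih hk', List.foldl_cons, List.foldl_nil]
    simp only [pvStepA2, PySem.List.pyGetD_natCast, ← hc]
    rw [Prod.mk.injEq]
    refine ⟨by ring, ?_⟩
    · have ht : s.take (k + 1 + 1) = s.take (k + 1) ++ [s.getD (k + 1) 0] := by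
        rw [List.take_add_one]
        congr 1
        rw [List.getElem?_eq_getElem hk, List.getD_eq_getElem s 0 hk]
        simp
      rw [ht]
      simp only [List.map_append, List.map_cons, List.map_nil]
      congr 2
      ring

lemma pvRunAux_zero_one (x : Int) (t : List Int) :
    pvRunAux (x :: t) [x] [0] x 0 = pvRunAux (x :: t) [x] [0] x 1 := by
  rw [pvRunAux, dif_pos (by simp : 0 < (x :: t).length), if_neg (by simp)]

-- ===== VERDICT (by name: the statement is the Claim_ definition above) =====
theorem GetSegmentClips_spec : Claim_equal_GetSegmentClips := by
  intro mat scale _hdom hpre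
  cases mat with
  | nil => exact absurd rfl hpre
  | cons x t =>
    unfold Spec_GetSegmentClips
    simp only [GetSegmentClips, GetSegmentClips_alt]
    have hh : (PySem.List.pyGet? (x :: t) 0).getD 0 = x := by
      simp
    rw [hh]
    have hA : (PySem.List.enumerate (x :: t) 0).foldl (pvStepA (x :: t)) ([x], [0], x)
        = pvRunAux (x :: t) [x] [0] x 1 := by
      rw [PySem.List.enumerate_eq_map_pyRange (x :: t) 0, List.foldl_map,
          ← pvRunAux_zero_one]
      have := pvFoldA (x :: t) ((x :: t).length) 0 (by omega) [x] [0] x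
      simpa using this
    have hB : (PySem.List.pyRange 1 ((x :: t).length : Int) 1).foldl
          (pvStepB (x :: t)) ([x], [0])
        = ((pvRunAux (x :: t) [x] [0] x 1).1, (pvRunAux (x :: t) [x] [0] x 1).2.1) := by
      have := pvFoldB (x :: t) ((x :: t).length - 1) 1 (by omega) (by omega) [x] [0]
      simpa using this
    rw [hA, hB]
    obtain ⟨ext, hs⟩ :=
      pvRunAux_start_prefix (x :: t) ((x :: t).length - 1) 1 (by omega) [x] [0] x
    set r := pvRunAux (x :: t) [x] [0] x 1 with hr
    set s := r.2.1 with hsdef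
    have hns : s ≠ [] := by rw [hs]; simp
    have h0 : s.getD 0 0 = 0 := by rw [hs]; rfl
    have hlen1 : 1 ≤ s.length := by rw [hs]; simp
    rw [PySem.List.slice_to_neg_one, List.length_dropLast,
        pvTele s scale h0 (s.length - 1) (by omega)]
    have htk : s.length - 1 + 1 = s.length := by omega
    rw [htk, List.take_length]
    have hlast : (PySem.List.pyGet? s (-1)).getD 0 = s.getD (s.length - 1) 0 := by
      rw [PySem.List.pyGet?_neg_one, List.getLast?_eq_getElem?]
      simp [List.getD_eq_getElem?_getD]
    rw [hlast]
    rw [Prod.mk.injEq, Prod.mk.injEq]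
    refine ⟨rfl, ?_, ?_⟩
    · rw [hs]
      dsimp only
      rw [List.dropLast_concat]
    · rw [hs]
      dsimp only
      simp only [List.cons_append, List.nil_append, List.map_cons, List.map_append,
        List.map_nil, List.drop_succ_cons, List.drop_zero]
      congr 1
      ring
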